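-- pv_equiv track=rewrite | github.com/mageshyt/INTERVIEW-PREP | contest/contest-433/q2.py | minMaxSums
-- ===== SOURCE A (Python) =====
-- from typing import List
--
-- def minMaxSums(nums: List[int], k: int) -> int:
--     mod=10**9+7
--     n=len(nums)
--     nums.sort()
--
--     dp=[[0] * (k+1) for _ in range(n+1)]
--     dp[0][0]=1
--
--     for i in range(1,n+1):
--         dp[i][0]=1
--
--         for j in range(1,min(i,k)+1):
--             dp[i][j]=(dp[i-1][j-1]+dp[i-1][j])%mod
--
--     result=0
--
--     for i in range(n):
--         for j in range(1,k+1):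
--             count_as_min=(dp[i][j-1]*nums[i])%mod
--             count_as_max=(dp[n-i-1][j-1]*nums[i])%mod
--             result=(result+count_as_max+count_as_min)%mod
--
--     return result
-- ===== SOURCE B (Python) =====
-- def minMaxSums(nums, k):
--     MOD = 10 ** 9 + 7
--     xs = sorted(nums)
--     n = len(xs)
--     if k <= 0:
--         return 0
--     r = k - 1
--     # S[m] = sum_{t=0}^{k-1} C(m, t) mod MOD, via S(m+1) = 2*S(m) - C(m, r),
--     # maintaining c = C(m, r) as an exact integer (multiplicative update).
--     S = []
--     s = 1
--     c = 1 if r == 0 else 0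
--     for m in range(n):
--         S.append(s)
--         s = (2 * s - c) % MOD
--         if m + 1 < r:
--             c = 0
--         elif m + 1 == r:
--             c = 1
--         else:
--             c = c * (m + 1) // (m + 1 - r)
--     res = 0
--     for i in range(n):
--         res = (res + xs[i] * (S[i] + S[n - 1 - i])) % MOD
--     return res
-- ===== Notes on version B (the rewrite author's own statement) =====
-- stated objective: faster
-- what changed: B replaces A's O(n*k) Pascal-triangle DP table by a single O(n) pass that maintains the partial binomial sum S(m)=sum_{t<k} C(m,t) via the recurrence S(m+1)=2*S(m)-C(m,k-1), updating C(m,k-1) multiplicatively, and then sums nums_sorted[i]*(S(i)+S(n-1-i)).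
import Mathlib
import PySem

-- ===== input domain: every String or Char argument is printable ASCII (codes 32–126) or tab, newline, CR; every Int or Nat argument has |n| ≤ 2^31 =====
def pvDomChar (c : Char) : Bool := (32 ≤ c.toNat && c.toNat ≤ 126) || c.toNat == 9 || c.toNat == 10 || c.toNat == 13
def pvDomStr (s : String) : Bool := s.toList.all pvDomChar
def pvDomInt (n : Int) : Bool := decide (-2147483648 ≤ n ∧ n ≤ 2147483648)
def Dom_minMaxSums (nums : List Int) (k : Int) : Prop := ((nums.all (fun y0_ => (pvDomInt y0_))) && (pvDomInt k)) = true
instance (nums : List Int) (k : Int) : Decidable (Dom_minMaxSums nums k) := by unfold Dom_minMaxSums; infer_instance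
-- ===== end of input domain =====

-- B replaces A's O(n·k) Pascal-triangle table by a single O(n) recurrence S(m+1)=2·S(m)−C(m,k−1)
-- over the partial binomial sums (objective: faster). Equivalence is about the RETURN value only:
-- A sorts `nums` in place, B does not mutate its argument.

-- ===== PORT A =====
def pvRowBaseA (kk : Nat) : List Int := (List.replicate (kk+1) 0).set 0 1

def pvRowStepA (p : Int) (kk : Nat) (prev : List Int) (i : Nat) : List Int :=
  (List.range (min i kk)).foldl
    (fun r j0 => r.set (j0+1) (PySem.Int.mod (prev.getD j0 0 + prev.getD (j0+1) 0) p))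
    (pvRowBaseA kk)

def pvDpA (p : Int) (kk n : Nat) : List (List Int) :=
  (List.range n).foldl (fun dp i0 => dp ++ [pvRowStepA p kk (dp.getD i0 []) (i0+1)])
    [pvRowBaseA kk]

def minMaxSums (nums : List Int) (k : Int) : Int :=
  let p : Int := 10^9+7
  let xs := PySem.List.sorted nums (fun x => x) false
  let n := xs.length
  let dp := pvDpA p k.toNat n
  (List.range n).foldl (fun res i =>
    (List.range k.toNat).foldl (fun res j0 =>
      let cmin := PySem.Int.mod ((dp.getD i []).getD j0 0 * xs.getD i 0) p
      let cmax := PySem.Int.mod ((dp.getD (n-i-1) []).getD j0 0 * xs.getD i 0) p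
      PySem.Int.mod (res + cmax + cmin) p) res) 0

-- ===== PORT B =====
def pvStepB (p r : Int) (acc : List Int × Int × Int) (m : Nat) : List Int × Int × Int :=
  (acc.1 ++ [acc.2.1],
   PySem.Int.mod (2*acc.2.1 - acc.2.2) p,
   if (m:Int)+1 < r then 0
   else if (m:Int)+1 = r then 1
   else PySem.Int.floordiv (acc.2.2 * ((m:Int)+1)) ((m:Int)+1-r))

def minMaxSums_alt (nums : List Int) (k : Int) : Int :=
  let p : Int := 10^9+7
  let xs := PySem.List.sorted nums (fun x => x) false
  let n := xs.length
  if k ≤ 0 then 0 else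
  let r := k - 1
  let S := ((List.range n).foldl (pvStepB p r) ([], 1, if r = 0 then 1 else 0)).1
  (List.range n).foldl (fun res i =>
    PySem.Int.mod (res + xs.getD i 0 * (S.getD i 0 + S.getD (n-1-i) 0)) p) 0

-- ===== PRECONDITION & SPEC =====
-- Pre_ excludes only k < 0, where A raises IndexError (dp's rows are empty lists).
def Pre_minMaxSums (nums : List Int) (k : Int) : Prop := 0 ≤ k
instance (nums : List Int) (k : Int) : Decidable (Pre_minMaxSums nums k) := by unfold Pre_minMaxSums; infer_instance
def pvWitness_minMaxSums : List Int × Int := ([3, -1, 4], 2)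

def Spec_minMaxSums (nums : List Int) (k : Int) (out : Int) : Prop := out = minMaxSums_alt nums k
instance (nums : List Int) (k : Int) (out : Int) : Decidable (Spec_minMaxSums nums k out) := by unfold Spec_minMaxSums; infer_instance

-- ===== CLAIM (what is proved, stated in full; the proofs are below) =====
def Claim_equal_minMaxSums : Prop := ∀ (nums : List Int) (k : Int), Dom_minMaxSums nums k → Pre_minMaxSums nums k → Spec_minMaxSums nums k (minMaxSums nums k)

-- ===== LEMMAS AND PROOFS =====

def pvSm (kk m : Nat) : Int := ((List.range kk).map (fun t => (m.choose t : Int))).sum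

-- ===== generic mod-fold lemmas =====
lemma pv_mod_step (p a b : Int) (hp : 0 < p) :
    PySem.Int.mod (PySem.Int.mod a p + b) p = PySem.Int.mod (a + b) p := by
  simp [PySem.Int.mod_eq_emod_of_pos hp, Int.emod_add_emod]

lemma pv_foldl_mod (p : Int) (hp : 0 < p) (l : List Nat) (f : Nat → Int) (a : Int) :
    l.foldl (fun acc t => PySem.Int.mod (acc + f t) p) (PySem.Int.mod a p)
      = PySem.Int.mod (a + (l.map f).sum) p := by
  induction l generalizing a with
  | nil => simp
  | cons x xs ih =>
    simp only [List.foldl_cons, List.map_cons, List.sum_cons]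
    rw [pv_mod_step p a (f x) hp, ih (a + f x), add_assoc]

lemma pv_foldl_mod2 (p : Int) (hp : 0 < p) (l : List Nat) (f g : Nat → Int) (a : Int) :
    l.foldl (fun acc t => PySem.Int.mod (acc + f t + g t) p) (PySem.Int.mod a p)
      = PySem.Int.mod (a + (l.map (fun t => f t + g t)).sum) p := by
  induction l generalizing a with
  | nil => simp
  | cons x xs ih =>
    simp only [List.foldl_cons, List.map_cons, List.sum_cons]
    rw [add_assoc (PySem.Int.mod a p), pv_mod_step p a (f x + g x) hp, ← add_assoc a,
      ih (a + f x + g x)]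
    ring_nf

lemma pv_sum_congr (p : Int) (l : List Nat) (f g : Nat → Int) (h : ∀ t ∈ l, f t % p = g t % p) :
    (l.map f).sum % p = (l.map g).sum % p := by
  induction l with
  | nil => rfl
  | cons x xs ih =>
    simp only [List.map_cons, List.sum_cons]
    rw [Int.add_emod, h x (by simp), ih (fun t ht => h t (by simp [ht])), ← Int.add_emod]

lemma pv_outer_fold (p : Int) (hp : 0 < p) (l : List Nat) (inner : Int → Nat → Int) (F : Nat → Int)
    (h : ∀ a i, i ∈ l → inner (PySem.Int.mod a p) i = PySem.Int.mod (a + F i) p) (a : Int) :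
    l.foldl inner (PySem.Int.mod a p) = PySem.Int.mod (a + (l.map F).sum) p := by
  induction l generalizing a with
  | nil => simp
  | cons x xs ih =>
    simp only [List.foldl_cons, List.map_cons, List.sum_cons]
    rw [h a x (by simp), ih (fun a i hi => h a i (by simp [hi])) (a + F x), add_assoc]

-- ===== set-fold characterisation (A's in-place row updates) =====
lemma pv_setfold_length (e : Nat → Int) (m : Nat) (row : List Int) :
    ((List.range m).foldl (fun r j0 => r.set (j0+1) (e j0)) row).length = row.length := by
  induction m with
  | zero => simp
  | succ m ih => rw [List.range_succ, List.foldl_append]; simp [ih]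

lemma pv_setfold_getD (e : Nat → Int) (m : Nat) (row : List Int) (t : Nat) (ht : t < row.length) :
    ((List.range m).foldl (fun r j0 => r.set (j0+1) (e j0)) row).getD t 0
      = if 1 ≤ t ∧ t ≤ m then e (t-1) else row.getD t 0 := by
  induction m with
  | zero => simp only [List.range_zero, List.foldl_nil]; rw [if_neg (by omega)]
  | succ m ih =>
    rw [List.range_succ, List.foldl_append]
    simp only [List.foldl_cons, List.foldl_nil]
    by_cases hteq : t = m+1
    · subst hteq
      have hlen : m+1 < ((List.range m).foldl (fun r j0 => r.set (j0+1) (e j0)) row).length := by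
        rw [pv_setfold_length]; exact ht
      rw [if_pos (by omega)]
      simp [List.getD, hlen]
    · have h1 : (((List.range m).foldl (fun r j0 => r.set (j0+1) (e j0)) row).set (m+1) (e m)).getD t 0
          = ((List.range m).foldl (fun r j0 => r.set (j0+1) (e j0)) row).getD t 0 := by
        simp only [List.getD_eq_getElem?_getD]; rw [List.getElem?_set_ne (by omega)]
      rw [h1, ih]
      by_cases h2 : 1 ≤ t ∧ t ≤ m
      · rw [if_pos h2, if_pos (by omega)]
      · rw [if_neg h2, if_neg (by omega)]

lemma pv_base_len (kk : Nat) : (pvRowBaseA kk).length = kk+1 := by simp [pvRowBaseA]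

lemma pv_base_getD (p : Int) (hp : 1 < p) (kk : Nat) :
    ∀ t, t ≤ kk → (pvRowBaseA kk).getD t 0 = PySem.Int.mod ((Nat.choose 0 t : Nat) : Int) p := by
  intro t ht
  have hemod : PySem.Int.mod ((Nat.choose 0 t : Nat) : Int) p = ((Nat.choose 0 t : Nat) : Int) % p :=
    PySem.Int.mod_eq_emod_of_pos (by omega)
  cases t with
  | zero =>
    rw [hemod]
    simp [pvRowBaseA, List.getD, Int.emod_eq_of_lt (by norm_num) hp]
  | succ s =>
    rw [hemod]
    simp only [List.getD_eq_getElem?_getD, pvRowBaseA]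
    rw [List.getElem?_set_ne (by omega)]
    simp [List.getElem?_replicate, Nat.lt_succ_of_le ht, Nat.choose_zero_succ]

lemma pv_row_spec (p : Int) (hp : 1 < p) (kk : Nat) (prev : List Int) (i0 : Nat)
    (hprev : ∀ t, t ≤ kk → prev.getD t 0 = PySem.Int.mod ((Nat.choose i0 t : Nat) : Int) p) :
    ∀ t, t ≤ kk → (pvRowStepA p kk prev (i0+1)).getD t 0
      = PySem.Int.mod ((Nat.choose (i0+1) t : Nat) : Int) p := by
  intro t ht
  have hp0 : (0:Int) < p := by omega
  unfold pvRowStepA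
  rw [pv_setfold_getD _ _ _ _ (by rw [pv_base_len]; omega)]
  by_cases hc : 1 ≤ t ∧ t ≤ min (i0+1) kk
  · rw [if_pos hc]
    obtain ⟨s, rfl⟩ : ∃ s, t = s+1 := ⟨t-1, by omega⟩
    simp only [Nat.add_sub_cancel]
    rw [hprev s (by omega), hprev (s+1) (by omega)]
    have h1 : Nat.choose (i0+1) (s+1) = Nat.choose i0 s + Nat.choose i0 (s+1) := Nat.choose_succ_succ i0 s
    simp only [PySem.Int.mod_eq_emod_of_pos hp0, h1]
    push_cast
    rw [Int.add_emod ((Nat.choose i0 s : Int)) _ p, ← Int.add_emod]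
  · rw [if_neg hc]
    rcases Nat.eq_zero_or_pos t with h0 | h1
    · subst h0; exact pv_base_getD p hp kk 0 (by omega)
    · have hti : i0+1 < t := by omega
      rw [pv_base_getD p hp kk t ht, Nat.choose_eq_zero_of_lt hti, Nat.choose_eq_zero_of_lt h1]

lemma pv_dp_len (p : Int) (kk n : Nat) : (pvDpA p kk n).length = n+1 := by
  unfold pvDpA
  induction n with
  | zero => simp
  | succ n ih => rw [List.range_succ, List.foldl_append]; simpa using ih

lemma pv_dp_spec (p : Int) (hp : 1 < p) (kk n : Nat) :
    ∀ i ≤ n, ∀ t, t ≤ kk → ((pvDpA p kk n).getD i []).getD t 0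
      = PySem.Int.mod ((Nat.choose i t : Nat) : Int) p := by
  induction n with
  | zero =>
    intro i hi t ht
    interval_cases i
    simpa [pvDpA] using pv_base_getD p hp kk t ht
  | succ n ih =>
    intro i hi t ht
    have hlen : (pvDpA p kk n).length = n+1 := pv_dp_len p kk n
    have hstep : pvDpA p kk (n+1)
        = pvDpA p kk n ++ [pvRowStepA p kk ((pvDpA p kk n).getD n []) (n+1)] := by
      unfold pvDpA
      rw [List.range_succ, List.foldl_append]
      rfl
    rcases Nat.lt_or_ge i (n+1) with hlt | hge
    · rw [hstep]
      have : (pvDpA p kk n ++ [pvRowStepA p kk ((pvDpA p kk n).getD n []) (n+1)]).getD i []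
          = (pvDpA p kk n).getD i [] := by
        simp only [List.getD_eq_getElem?_getD]
        rw [List.getElem?_append_left (by omega)]
      rw [this]
      exact ih i (by omega) t ht
    · have hie : i = n+1 := by omega
      subst hie
      rw [hstep]
      have : (pvDpA p kk n ++ [pvRowStepA p kk ((pvDpA p kk n).getD n []) (n+1)]).getD (n+1) []
          = pvRowStepA p kk ((pvDpA p kk n).getD n []) (n+1) := by
        simp only [List.getD_eq_getElem?_getD]
        rw [List.getElem?_append_right (by omega)]
        simp [hlen]
      rw [this]
      exact pv_row_spec p hp kk _ n (fun t' ht' => ih n (by omega) t' ht') t ht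

lemma pv_Sm_zero (kk : Nat) (hk : 1 ≤ kk) : pvSm kk 0 = 1 := by
  obtain ⟨kk', rfl⟩ : ∃ kk', kk = kk'+1 := ⟨kk-1, by omega⟩
  unfold pvSm
  rw [List.range_succ_eq_map]
  simp [List.map_map, Function.comp_def, Nat.choose_zero_succ]

lemma pv_Sm_rec (kk m : Nat) (hk : 1 ≤ kk) :
    pvSm kk (m+1) = 2 * pvSm kk m - ((Nat.choose m (kk-1) : Nat) : Int) := by
  obtain ⟨kk', rfl⟩ : ∃ kk', kk = kk'+1 := ⟨kk-1, by omega⟩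
  simp only [Nat.add_sub_cancel]
  have h1 : pvSm (kk'+1) m
      = ((List.range kk').map (fun t => (Nat.choose m t : Int))).sum + (Nat.choose m kk' : Int) := by
    unfold pvSm; rw [List.range_succ, List.map_append, List.sum_append]; simp
  have h2 : pvSm (kk'+1) m
      = 1 + ((List.range kk').map (fun t => (Nat.choose m (t+1) : Int))).sum := by
    unfold pvSm; rw [List.range_succ_eq_map]
    simp [List.map_map, Function.comp_def]
  have h3 : pvSm (kk'+1) (m+1)
      = 1 + ((List.range kk').map (fun t => ((Nat.choose m t : Int) + (Nat.choose m (t+1) : Int)))).sum := by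
    unfold pvSm
    rw [List.range_succ_eq_map, List.map_cons, List.sum_cons, List.map_map]
    have hcomp : ((fun t => ((Nat.choose (m+1) t : Nat) : Int)) ∘ (· + 1))
        = fun t => ((Nat.choose m t : Int) + (Nat.choose m (t+1) : Int)) := by
      funext t
      simp [Function.comp, Nat.choose_succ_succ]
    rw [hcomp]
    simp
  rw [h3, PySem.List.sum_map_add_int]
  have h4 := h1
  have h5 := h2
  linarith [h1, h2]

lemma pv_choose_div (m rr : Nat) (h : rr ≤ m) :
    PySem.Int.floordiv ((Nat.choose m rr : Int) * ((m:Int)+1)) ((m:Int)+1-(rr:Int))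
      = ((Nat.choose (m+1) rr : Nat) : Int) := by
  have hpos : (0:Int) < (m:Int)+1-(rr:Int) := by omega
  rw [PySem.Int.floordiv_eq_ediv_of_pos hpos]
  have hnum : (Nat.choose m rr : Int) * ((m:Int)+1)
      = ((Nat.choose (m+1) rr : Nat) : Int) * ((m:Int)+1-(rr:Int)) := by
    have hc := Nat.choose_mul_succ_eq m rr
    have hd : ((m:Int)+1-(rr:Int)) = ((m+1-rr : Nat) : Int) := by
      rw [Nat.cast_sub (by omega)]; push_cast; ring
    rw [hd]
    exact_mod_cast hc
  rw [hnum, Int.mul_ediv_cancel _ (by omega)]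

lemma pv_Bfold (p : Int) (hp : 1 < p) (kk : Nat) (hk : 1 ≤ kk) (m : Nat) :
    (List.range m).foldl (pvStepB p ((kk:Int)-1)) ([], 1, if ((kk:Int)-1) = 0 then 1 else 0)
      = ((List.range m).map (fun t => PySem.Int.mod (pvSm kk t) p),
         PySem.Int.mod (pvSm kk m) p, ((Nat.choose m (kk-1) : Nat) : Int)) := by
  have hp0 : (0:Int) < p := by omega
  induction m with
  | zero =>
    simp only [List.range_zero, List.foldl_nil, List.map_nil]
    refine Prod.ext rfl (Prod.ext ?_ ?_)
    · show (1:Int) = PySem.Int.mod (pvSm kk 0) p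
      rw [pv_Sm_zero kk hk, PySem.Int.mod_eq_emod_of_pos hp0, Int.emod_eq_of_lt (by norm_num) hp]
    · show (if ((kk:Int)-1) = 0 then (1:Int) else 0) = ((Nat.choose 0 (kk-1) : Nat) : Int)
      by_cases h0 : kk = 1
      · subst h0; simp
      · rw [if_neg (by omega), Nat.choose_eq_zero_of_lt (by omega)]
        simp
  | succ m ih =>
    rw [List.range_succ, List.foldl_append, List.foldl_cons, List.foldl_nil, ih]
    unfold pvStepB
    dsimp only
    refine Prod.ext ?_ (Prod.ext ?_ ?_)
    · dsimp only; rw [List.map_append]; simp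
    · dsimp only
      rw [pv_Sm_rec kk m hk]
      simp only [PySem.Int.mod_eq_emod_of_pos hp0]
      conv_lhs => rw [Int.sub_emod, Int.mul_emod 2 ((pvSm kk m) % p), Int.emod_emod_of_dvd _ dvd_rfl, ← Int.mul_emod]
      rw [← Int.sub_emod]
    · dsimp only
      by_cases hlt : (m:Int)+1 < (kk:Int)-1
      · rw [if_pos hlt, Nat.choose_eq_zero_of_lt (by omega)]
        simp
      · rw [if_neg hlt]
        by_cases heq : (m:Int)+1 = (kk:Int)-1
        · have h6 : m+1 = kk-1 := by omega
          rw [if_pos heq, ← h6, Nat.choose_self]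
          simp
        · rw [if_neg heq]
          have hrr : kk-1 ≤ m := by omega
          have hd : (m:Int)+1-((kk:Int)-1) = (m:Int)+1-((kk-1 : Nat):Int) := by
            rw [Nat.cast_sub (by omega)]; push_cast; ring
          rw [hd]
          exact pv_choose_div m (kk-1) hrr

lemma pv_mod_zero (p : Int) (hp : 0 < p) : PySem.Int.mod 0 p = 0 := by
  simp [PySem.Int.mod_eq_emod_of_pos hp]

lemma pv_outer_fold0 (p : Int) (hp : 0 < p) (l : List Nat) (inner : Int → Nat → Int) (F : Nat → Int)
    (h : ∀ a i, i ∈ l → inner (PySem.Int.mod a p) i = PySem.Int.mod (a + F i) p) :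
    l.foldl inner 0 = PySem.Int.mod ((l.map F).sum) p := by
  rw [← pv_mod_zero p hp, pv_outer_fold p hp l inner F h 0, zero_add]

lemma pv_foldl_mod0 (p : Int) (hp : 0 < p) (l : List Nat) (f : Nat → Int) :
    l.foldl (fun acc t => PySem.Int.mod (acc + f t) p) 0 = PySem.Int.mod ((l.map f).sum) p := by
  rw [← pv_mod_zero p hp, pv_foldl_mod p hp l f 0, zero_add]

lemma pv_term_A (p : Int) (hp0 : 0 < p) (u v x : Int) :
    (PySem.Int.mod (PySem.Int.mod u p * x) p + PySem.Int.mod (PySem.Int.mod v p * x) p) % p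
      = (u*x + v*x) % p := by
  simp only [PySem.Int.mod_eq_emod_of_pos hp0]
  have h1 : (u % p * x) % p = (u*x) % p := by
    rw [Int.mul_emod, Int.emod_emod_of_dvd _ dvd_rfl, ← Int.mul_emod]
  have h2 : (v % p * x) % p = (v*x) % p := by
    rw [Int.mul_emod, Int.emod_emod_of_dvd _ dvd_rfl, ← Int.mul_emod]
  rw [h1, h2, ← Int.add_emod]

lemma pv_term_B (p : Int) (hp0 : 0 < p) (x a b : Int) :
    (x * (PySem.Int.mod a p + PySem.Int.mod b p)) % p = (x * (a + b)) % p := by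
  simp only [PySem.Int.mod_eq_emod_of_pos hp0]
  rw [Int.mul_emod x (a % p + b % p), Int.add_emod (a % p) (b % p),
    Int.emod_emod_of_dvd _ dvd_rfl, Int.emod_emod_of_dvd _ dvd_rfl,
    ← Int.add_emod, ← Int.mul_emod]

lemma pv_sum_congr' (p : Int) (hp0 : 0 < p) (l : List Nat) (f g : Nat → Int) (h : ∀ t ∈ l, f t % p = g t % p) :
    PySem.Int.mod (l.map f).sum p = PySem.Int.mod (l.map g).sum p := by
  simp only [PySem.Int.mod_eq_emod_of_pos hp0]
  exact pv_sum_congr p l f g h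

lemma pv_getD_map_range (n : Nat) (f : Nat → Int) (i : Nat) (h : i < n) :
    ((List.range n).map f).getD i 0 = f i := by
  simp [h]

theorem pv_main (nums : List Int) (k : Int) (hk0 : 0 ≤ k) :
    minMaxSums nums k = minMaxSums_alt nums k := by
  have hp : (1:Int) < 10^9+7 := by norm_num
  have hp0 : (0:Int) < 10^9+7 := by norm_num
  simp only [minMaxSums, minMaxSums_alt]
  by_cases hk : k ≤ 0
  · have hke : k = 0 := le_antisymm hk hk0
    subst hke
    rw [if_pos (le_refl (0:Int))]
    simp only [Int.toNat_zero, List.range_zero, List.foldl_nil]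
    induction (List.range (PySem.List.sorted nums (fun x => x) false).length) with
    | nil => rfl
    | cons y ys ih => simpa using ih
  · rw [if_neg hk]
    set xs := PySem.List.sorted nums (fun x => x) false with hxs
    set n := xs.length with hn
    set kk := k.toNat with hkk
    have hkkc : (kk:Int) = k := Int.toNat_of_nonneg hk0
    have hk1 : 1 ≤ kk := by omega
    rw [← hkkc, pv_Bfold _ hp kk hk1 n]
    set P : Int := 10^9+7 with hP
    set dp := pvDpA P kk n with hdp
    dsimp only
    rw [pv_foldl_mod0 P hp0 (List.range n)
      (fun i => xs.getD i 0 * (((List.range n).map (fun t => PySem.Int.mod (pvSm kk t) P)).getD i 0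
        + ((List.range n).map (fun t => PySem.Int.mod (pvSm kk t) P)).getD (n-1-i) 0))]
    rw [pv_outer_fold0 P hp0 (List.range n) _
      (fun i => ((List.range kk).map (fun j0 =>
          PySem.Int.mod ((dp.getD (n-i-1) []).getD j0 0 * xs.getD i 0) P
        + PySem.Int.mod ((dp.getD i []).getD j0 0 * xs.getD i 0) P)).sum)
      (fun a i _ => pv_foldl_mod2 P hp0 (List.range kk)
        (fun j0 => PySem.Int.mod ((dp.getD (n-i-1) []).getD j0 0 * xs.getD i 0) P)
        (fun j0 => PySem.Int.mod ((dp.getD i []).getD j0 0 * xs.getD i 0) P) a)]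
    apply pv_sum_congr' P hp0
    intro i hi
    have hin : i < n := List.mem_range.mp hi
    have hdpv := pv_dp_spec P hp kk n
    have e1 : (((List.range kk).map (fun j0 =>
          PySem.Int.mod ((dp.getD (n-i-1) []).getD j0 0 * xs.getD i 0) P
        + PySem.Int.mod ((dp.getD i []).getD j0 0 * xs.getD i 0) P)).sum) % P
        = (((List.range kk).map (fun j0 =>
            (Nat.choose (n-i-1) j0 : Int) * xs.getD i 0 + (Nat.choose i j0 : Int) * xs.getD i 0)).sum) % P := by
      apply pv_sum_congr
      intro j0 hj0
      have hj : j0 ≤ kk := le_of_lt (List.mem_range.mp hj0)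
      rw [hdpv (n-i-1) (by omega) j0 hj, hdpv i (by omega) j0 hj]
      exact pv_term_A P hp0 _ _ _
    rw [e1, PySem.List.sum_map_add_int, List.sum_map_mul_right, List.sum_map_mul_right]
    rw [pv_getD_map_range n _ i hin, pv_getD_map_range n _ (n-1-i) (by omega)]
    rw [pv_term_B P hp0]
    have hsub : n-i-1 = n-1-i := by omega
    rw [hsub]
    unfold pvSm
    congr 1
    ring

-- ===== VERDICT (by name: the statement is the Claim_ definition above) =====
theorem minMaxSums_spec : Claim_equal_minMaxSums := by
  intro nums k _ hpre
  unfold Spec_minMaxSums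
  exact pv_main nums k hpre
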